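-- pv_equiv track=rewrite | github.com/maberbac/gestion-condos | scripts/recreate_inserts.py | _determine_insert_order
-- ===== SOURCE A (Python) =====
-- from typing import List, Dict, Any, Optional
--
-- def _determine_insert_order(tables: Dict[str, Any]) -> List[str]:
--     """
--     Détermine l'ordre optimal d'insertion selon les dépendances.
--
--     Args:
--         tables: Dictionnaire des tables et leurs données
--
--     Returns:
--         Liste des noms de tables dans l'ordre d'insertion
--     """
--     # Ordre logique basé sur les dépendances
--     priority_order = [
--         'system_config',       # Configuration système en premier
--         'feature_flags',       # Flags de fonctionnalités
--         'users',              # Utilisateurs (indépendants)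
--         'projects',           # Projets (référencés par units)
--         'units',              # Unités (dépend de projects)
--         'financial_records'   # Records financiers (dépend d'autres tables)
--     ]
--
--     # Ajouter les tables connues dans l'ordre de priorité
--     ordered_tables = []
--     for table in priority_order:
--         if table in tables:
--             ordered_tables.append(table)
--
--     # Ajouter les tables restantes
--     for table in tables:
--         if table not in ordered_tables:
--             ordered_tables.append(table)
--
--     return ordered_tables
-- ===== SOURCE B (Python) =====
-- def _determine_insert_order(tables):
--     priority_order = [
--         'system_config',
--         'feature_flags',
--         'users',
--         'projects',
--         'units',
--         'financial_records'
--     ]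
--     return sorted(tables,
--                   key=lambda t: priority_order.index(t) if t in priority_order
--                                 else len(priority_order))
-- ===== Notes on version B (the rewrite author's own statement) =====
-- stated objective: faster
-- what changed: Replaces A's quadratic second loop (a 'not in ordered_tables' scan per table) with a single stable sort keyed by priority index, with len(priority_order) as the shared key for unknown tables so stability preserves their dict order.
import Mathlib
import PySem

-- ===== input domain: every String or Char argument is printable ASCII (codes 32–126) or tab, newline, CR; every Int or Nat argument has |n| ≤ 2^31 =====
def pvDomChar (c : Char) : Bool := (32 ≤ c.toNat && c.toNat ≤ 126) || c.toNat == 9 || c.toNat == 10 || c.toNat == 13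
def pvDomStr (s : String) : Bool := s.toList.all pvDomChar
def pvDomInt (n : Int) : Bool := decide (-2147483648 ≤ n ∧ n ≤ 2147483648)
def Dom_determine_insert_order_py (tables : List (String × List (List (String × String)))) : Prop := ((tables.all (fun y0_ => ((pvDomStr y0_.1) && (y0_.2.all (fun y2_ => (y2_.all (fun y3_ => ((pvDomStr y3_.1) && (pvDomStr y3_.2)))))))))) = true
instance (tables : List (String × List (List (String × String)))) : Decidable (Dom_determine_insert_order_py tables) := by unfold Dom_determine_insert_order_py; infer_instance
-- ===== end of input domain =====

-- ===== PORT A =====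
-- B replaces A's two append-loops by one stable sort on a priority-index key (idiomatic rewrite, same return value).
def determine_insert_order_py (tables : List (String × List (List (String × String)))) : List String :=
  let priority_order : List String :=
    ["system_config", "feature_flags", "users", "projects", "units", "financial_records"]
  -- first loop: append the known tables in priority order
  let ordered_tables : List String :=
    priority_order.foldl
      (fun acc table => if (tables.map Prod.fst).contains table then acc ++ [table] else acc) []
  -- second loop: append the remaining tables (dict iteration = keys in insertion order)
  (tables.map Prod.fst).foldl
    (fun acc table => if acc.contains table then acc else acc ++ [table]) ordered_tables

-- ===== PORT B =====
def pvPriorityOrderB : List String :=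
  ["system_config", "feature_flags", "users", "projects", "units", "financial_records"]

-- 'priority_order.index(t) if t in priority_order else len(priority_order)'
-- (index? is some exactly when the membership test holds, so the getD default is never used)
def pvKeyB (t : String) : Int :=
  if pvPriorityOrderB.contains t then ((PySem.List.index? pvPriorityOrderB t).getD 0 : Nat)
  else (6 : Int)

def determine_insert_order_py_alt (tables : List (String × List (List (String × String)))) : List String :=
  PySem.List.sorted (tables.map Prod.fst) pvKeyB false

-- ===== PRECONDITION & SPEC =====
-- Pre_ only states that the association list represents a Python dict: keys are unique.
-- A Python dict can never present duplicate keys, so no actual input of A is excluded.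
def Pre_determine_insert_order_py (tables : List (String × List (List (String × String)))) : Prop :=
  (tables.map Prod.fst).Nodup
instance (tables : List (String × List (List (String × String)))) : Decidable (Pre_determine_insert_order_py tables) := by unfold Pre_determine_insert_order_py; infer_instance

def pvWitness_determine_insert_order_py : (List (String × List (List (String × String)))) :=
  [("users", [[("id", "1")]]), ("zebra", []), ("projects", [])]

def Spec_determine_insert_order_py (tables : List (String × List (List (String × String)))) (out : List String) : Prop := out = determine_insert_order_py_alt tables
instance (tables : List (String × List (List (String × String)))) (out : List String) : Decidable (Spec_determine_insert_order_py tables out) := by unfold Spec_determine_insert_order_py; infer_instance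

-- ===== CLAIM (what is proved, stated in full; the proofs are below) =====
def Claim_equal_determine_insert_order_py : Prop := ∀ (tables : List (String × List (List (String × String)))), Dom_determine_insert_order_py tables → Pre_determine_insert_order_py tables → Spec_determine_insert_order_py tables (determine_insert_order_py tables)

-- ===== LEMMAS AND PROOFS =====

-- insertBy places x after every element it is not 'before' and in front of the rest
lemma insertBy_mid {α : Type} (before : α → α → Bool) (x : α) (as bs : List α)
    (ha : ∀ a ∈ as, before x a = false) (hb : ∀ b ∈ bs, before x b = true) :
    PySem.List.insertBy before x (as ++ bs) = as ++ x :: bs := by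
  induction as with
  | nil =>
    cases bs with
    | nil => simp [PySem.List.insertBy]
    | cons b bs' => simp [PySem.List.insertBy, hb b (by simp)]
  | cons a as' ih =>
    have hxa := ha a (by simp)
    simp only [List.cons_append, PySem.List.insertBy, hxa]
    simp only [Bool.false_eq_true, if_false]
    rw [ih (fun a' h => ha a' (by simp [h]))]

-- a stable sort is the concatenation of the key buckets, in key order
lemma sorted_eq_buckets {α : Type} (key : α → Int) (bs : List Int)
    (hb : bs.Pairwise (· < ·)) (xs : List α) (hx : ∀ x ∈ xs, key x ∈ bs) :
    PySem.List.sorted xs key false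
      = bs.flatMap (fun i => xs.filter (fun x => key x == i)) := by
  have main : ∀ (l l₀ : List α), (∀ x ∈ l, key x ∈ bs) →
      l.foldl (fun acc x => PySem.List.insertBy (fun a b => decide (key a < key b)) x acc)
        (bs.flatMap (fun i => l₀.filter (fun x => key x == i)))
      = bs.flatMap (fun i => (l₀ ++ l).filter (fun x => key x == i)) := by
    intro l
    induction l with
    | nil => intro l₀ _; simp
    | cons x l ih =>
      intro l₀ hxl
      rw [List.foldl_cons]
      have hk : key x ∈ bs := hxl x (by simp)
      obtain ⟨b1, b2, hsplit⟩ := List.append_of_mem hk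
      have hstep : PySem.List.insertBy (fun a b => decide (key a < key b)) x
          (bs.flatMap (fun i => l₀.filter (fun y => key y == i)))
        = bs.flatMap (fun i => (l₀ ++ [x]).filter (fun y => key y == i)) := by
        subst hsplit
        rcases List.pairwise_append.mp hb with ⟨hb1, hb2, h12⟩
        have hlt1 : ∀ i ∈ b1, i < key x := fun i hi => h12 i hi (key x) (by simp)
        have hlt2 : ∀ j ∈ b2, key x < j := fun j hj => (List.pairwise_cons.mp hb2).1 j hj
        rw [List.flatMap_append, List.flatMap_cons, List.flatMap_append, List.flatMap_cons]
        rw [← List.append_assoc, ← List.append_assoc]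
        rw [insertBy_mid]
        · have e1 : List.flatMap (fun i => List.filter (fun y => key y == i) (l₀ ++ [x])) b1
              = List.flatMap (fun i => List.filter (fun y => key y == i) l₀) b1 := by
            apply List.flatMap_congr; intro i hi
            have hne : ¬ (key x = i) := by have := hlt1 i hi; omega
            simp [List.filter_append, hne]
          have e2 : List.flatMap (fun i => List.filter (fun y => key y == i) (l₀ ++ [x])) b2
              = List.flatMap (fun i => List.filter (fun y => key y == i) l₀) b2 := by
            apply List.flatMap_congr; intro j hj
            have hne : ¬ (key x = j) := by have := hlt2 j hj; omega
            simp [List.filter_append, hne]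
          have e3 : List.filter (fun y => key y == key x) (l₀ ++ [x])
              = List.filter (fun y => key y == key x) l₀ ++ [x] := by
            simp [List.filter_append]
          rw [e1, e2, e3]
          simp [List.append_assoc]
        · intro a hamem
          rcases List.mem_append.mp hamem with h1 | h2
          · rcases List.mem_flatMap.mp h1 with ⟨i, hi, hfi⟩
            have : key a = i := by simpa using (List.mem_filter.mp hfi).2
            have := hlt1 i hi
            simp; omega
          · have : key a = key x := by simpa using (List.mem_filter.mp h2).2
            simp; omega
        · intro b hbm
          rcases List.mem_flatMap.mp hbm with ⟨j, hj, hfj⟩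
          have : key b = j := by simpa using (List.mem_filter.mp hfj).2
          have := hlt2 j hj
          simp; omega
      rw [hstep]
      have h2 := ih (l₀ ++ [x]) (fun y hy => hxl y (by simp [hy]))
      rw [List.append_assoc] at h2
      simpa using h2
  have h0 := main xs [] hx
  rw [PySem.List.sorted_eq_foldl_insertBy]
  have hnil : List.flatMap (fun _ : Int => ([] : List α)) bs = [] := by
    induction bs <;> simp_all
  simpa [hnil] using h0

-- the A-side dedup loop over a Nodup list just appends the fresh elements
lemma foldl_dedup {α : Type} [DecidableEq α] (keys : List α) (acc : List α) (h : keys.Nodup) :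
    keys.foldl (fun acc t => if acc.contains t then acc else acc ++ [t]) acc
      = acc ++ keys.filter (fun t => !acc.contains t) := by
  induction keys generalizing acc with
  | nil => simp
  | cons t ks ih =>
    rcases List.nodup_cons.mp h with ⟨htks, hks⟩
    rw [List.foldl_cons, List.filter_cons]
    by_cases hm : acc.contains t
    · rw [if_pos hm, ih _ hks]
      rw [List.contains_iff_mem] at hm
      simp [hm]
    · rw [if_neg hm, ih _ hks]
      have hfe : List.filter (fun s => !(acc ++ [t]).contains s) ks = List.filter (fun s => !acc.contains s) ks := by
        apply List.filter_congr; intro s hs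
        have hne : s ≠ t := fun e => htks (e ▸ hs)
        simp [hne]
      rw [hfe]
      rw [List.contains_iff_mem] at hm
      simp [hm]

lemma pvKeyB_eq (t : String) : pvKeyB t =
    if t = "system_config" then 0 else if t = "feature_flags" then 1
    else if t = "users" then 2 else if t = "projects" then 3
    else if t = "units" then 4 else if t = "financial_records" then 5 else 6 := by
  by_cases h0 : t = "system_config"
  · subst h0; decide
  by_cases h1 : t = "feature_flags"
  · subst h1; decide
  by_cases h2 : t = "users"
  · subst h2; decide
  by_cases h3 : t = "projects"
  · subst h3; decide
  by_cases h4 : t = "units"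
  · subst h4; decide
  by_cases h5 : t = "financial_records"
  · subst h5; decide
  simp [pvKeyB, pvPriorityOrderB, h0, h1, h2, h3, h4, h5]

lemma filter_beq_of_nodup {α : Type} [DecidableEq α] (keys : List α) (a : α) (h : keys.Nodup) :
    keys.filter (fun t => t == a) = if a ∈ keys then [a] else [] := by
  induction keys with
  | nil => simp
  | cons k ks ih =>
    rcases List.nodup_cons.mp h with ⟨hk, hks⟩
    by_cases he : k = a
    · subst he
      simp [ih hks, hk]
    · simp [he, ih hks, Ne.symm he]

lemma filter_expand {α : Type} (p : α → Bool) (a : α) (L t : List α) :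
    (List.filter p (a :: L)) ++ t = (if p a then [a] else []) ++ (List.filter p L ++ t) := by
  by_cases h : p a <;> simp [h]

set_option maxHeartbeats 1000000 in
lemma port_eq (tables : List (String × List (List (String × String))))
    (hpre : (tables.map Prod.fst).Nodup) :
    determine_insert_order_py tables = determine_insert_order_py_alt tables := by
  rw [determine_insert_order_py, determine_insert_order_py_alt]
  rw [show (["system_config", "feature_flags", "users", "projects", "units",
      "financial_records"] : List String) = pvPriorityOrderB from rfl]
  set keys := tables.map Prod.fst with hkeys
  have hmem : ∀ t ∈ keys, pvKeyB t ∈ ([0,1,2,3,4,5,6] : List Int) := by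
    intro t _
    rw [pvKeyB_eq t]
    split_ifs <;> simp
  rw [sorted_eq_buckets pvKeyB ([0,1,2,3,4,5,6] : List Int) (by decide) keys hmem]
  simp only [PySem.List.foldl_append_if_eq_filter, List.nil_append]
  rw [foldl_dedup _ _ hpre]
  have htail : keys.filter (fun t => !(pvPriorityOrderB.filter (fun s => keys.contains s)).contains t)
      = keys.filter (fun t => !pvPriorityOrderB.contains t) := by
    apply List.filter_congr
    intro t ht
    have : (pvPriorityOrderB.filter (fun s => keys.contains s)).contains t
        = pvPriorityOrderB.contains t := by
      simp [List.mem_filter, ht]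
    rw [this]
  rw [htail]
  have conv0 : ∀ (i : Int) (a : String),
      (∀ t, (pvKeyB t == i) = (t == a)) →
      keys.filter (fun t => pvKeyB t == i) = if a ∈ keys then [a] else [] := by
    intro i a hpt
    rw [List.filter_congr (fun t _ => hpt t), filter_beq_of_nodup _ _ hpre]
  have hb0 := conv0 0 "system_config" (by
    intro t; rw [pvKeyB_eq]; split_ifs with h0 h1 h2 h3 h4 h5 <;> simp_all)
  have hb1 := conv0 1 "feature_flags" (by
    intro t; rw [pvKeyB_eq]; split_ifs with h0 h1 h2 h3 h4 h5 <;> simp_all)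
  have hb2 := conv0 2 "users" (by
    intro t; rw [pvKeyB_eq]; split_ifs with h0 h1 h2 h3 h4 h5 <;> simp_all)
  have hb3 := conv0 3 "projects" (by
    intro t; rw [pvKeyB_eq]; split_ifs with h0 h1 h2 h3 h4 h5 <;> simp_all)
  have hb4 := conv0 4 "units" (by
    intro t; rw [pvKeyB_eq]; split_ifs with h0 h1 h2 h3 h4 h5 <;> simp_all)
  have hb5 := conv0 5 "financial_records" (by
    intro t; rw [pvKeyB_eq]; split_ifs with h0 h1 h2 h3 h4 h5 <;> simp_all)
  have hb6 : keys.filter (fun t => pvKeyB t == (6:Int))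
      = keys.filter (fun t => !pvPriorityOrderB.contains t) := by
    apply List.filter_congr; intro t _
    rw [pvKeyB_eq]
    split_ifs with h0 h1 h2 h3 h4 h5 <;> simp_all [pvPriorityOrderB]
  simp only [List.flatMap_cons, List.flatMap_nil, hb0, hb1, hb2, hb3, hb4, hb5, hb6,
    List.append_nil]
  simp only [pvPriorityOrderB]
  rw [filter_expand, filter_expand, filter_expand, filter_expand, filter_expand, filter_expand]
  simp

-- ===== VERDICT (by name: the statement is the Claim_ definition above) =====
theorem determine_insert_order_py_spec : Claim_equal_determine_insert_order_py := by
  intro tables _ hpre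
  exact port_eq tables hpre
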